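-- pv_equiv track=rewrite | github.com/Sichovuk/MLTA-labs | MLTA_lab1.py | edges_to_incidence_matrix
-- ===== SOURCE A (Python) =====
-- def edges_to_incidence_matrix(vertices, edges, directed=False):
--     n, m = len(vertices), len(edges)
--     idx = {v: i for i, v in enumerate(vertices)}
--     Inc = [[0] * m for _ in range(n)]
--
--     for col, (u, v) in enumerate(edges):
--         i, j = idx[u], idx[v]
--         if directed:
--             Inc[i][col] = 1
--             Inc[j][col] = -1
--         else:
--             Inc[i][col] = 1
--             Inc[j][col] = 1
--     return Inc
-- ===== SOURCE B (Python) =====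
-- def edges_to_incidence_matrix(vertices, edges, directed=False):
--     n = len(vertices)
--     idx = {v: i for i, v in enumerate(vertices)}
--     cols = []
--     for (u, v) in edges:
--         col = [0] * n
--         if directed:
--             col[idx[u]] = 1
--             col[idx[v]] = -1
--         else:
--             col[idx[u]] = 1
--             col[idx[v]] = 1
--         cols.append(col)
--     return [[cols[c][r] for c in range(len(edges))] for r in range(n)]
-- ===== Notes on version B (the rewrite author's own statement) =====
-- stated objective: alternative
-- what changed: B builds one fresh column vector per edge and produces the matrix in a separate transpose pass, instead of A's writing directly into shared pre-allocated rows.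
-- outside the precondition, e.g. on edges_to_incidence_matrix([1, 2], [(1, 3)], False): A raises KeyError, B raises KeyError
import Mathlib
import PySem

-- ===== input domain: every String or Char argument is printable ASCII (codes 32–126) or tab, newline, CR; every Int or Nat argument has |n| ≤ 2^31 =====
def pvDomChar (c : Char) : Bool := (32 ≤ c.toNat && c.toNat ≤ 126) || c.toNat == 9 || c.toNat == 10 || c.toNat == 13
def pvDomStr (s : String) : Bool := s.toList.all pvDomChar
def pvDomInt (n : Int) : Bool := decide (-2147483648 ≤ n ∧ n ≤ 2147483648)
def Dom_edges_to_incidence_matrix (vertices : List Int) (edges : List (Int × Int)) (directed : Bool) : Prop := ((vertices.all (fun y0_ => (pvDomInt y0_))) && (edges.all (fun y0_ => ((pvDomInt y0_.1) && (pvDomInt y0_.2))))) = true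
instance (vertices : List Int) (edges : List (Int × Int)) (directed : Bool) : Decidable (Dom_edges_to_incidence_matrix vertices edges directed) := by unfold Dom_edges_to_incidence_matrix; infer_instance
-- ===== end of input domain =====

-- B builds one fresh column per edge and transposes in a second pass, instead of A's in-place writes
-- into shared pre-allocated rows (objective: alternative decomposition, same cost).


-- shared by both Pythons: idx = {v: i for i, v in enumerate(vertices)}
def pvIdx (vertices : List Int) : PySem.Dict Int Int :=
  (PySem.List.enumerate vertices 0).foldl (fun d p => d.insert p.2 p.1) PySem.Dict.empty

-- idx[u] (KeyError excluded by Pre_); List.set is exact here: indices are always in range under Pre_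
def pvLook (idx : PySem.Dict Int Int) (u : Int) : Nat := ((idx.get? u).getD 0).toNat

-- ===== PORT A =====
-- the body of A's for-loop, named for the proofs (structure unchanged)
def pvStepA (idx : PySem.Dict Int Int) (directed : Bool) (Inc : List (List Int)) (p : Int × (Int × Int)) : List (List Int) :=
  let col := p.1.toNat
  let i := pvLook idx p.2.1
  let j := pvLook idx p.2.2
  if directed then
    let M1 := Inc.set i ((Inc.getD i []).set col 1)
    M1.set j ((M1.getD j []).set col (-1))
  else
    let M1 := Inc.set i ((Inc.getD i []).set col 1)
    M1.set j ((M1.getD j []).set col 1)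

def edges_to_incidence_matrix (vertices : List Int) (edges : List (Int × Int)) (directed : Bool) : List (List Int) :=
  let n := vertices.length
  let m := edges.length
  let idx := pvIdx vertices
  let Inc := List.replicate n (List.replicate m (0 : Int))
  (PySem.List.enumerate edges 0).foldl (pvStepA idx directed) Inc

-- ===== PORT B =====
def edges_to_incidence_matrix_alt (vertices : List Int) (edges : List (Int × Int)) (directed : Bool) : List (List Int) :=
  let n := vertices.length
  let idx := pvIdx vertices
  let cols := edges.map (fun e =>
    let col := List.replicate n (0 : Int)
    if directed then
      (col.set (pvLook idx e.1) 1).set (pvLook idx e.2) (-1)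
    else
      (col.set (pvLook idx e.1) 1).set (pvLook idx e.2) 1)
  (List.range n).map (fun r => (List.range edges.length).map (fun c => (cols.getD c []).getD r 0))

-- ===== PRECONDITION & SPEC =====
-- Pre_ excludes exactly the inputs where Python A raises KeyError (an edge endpoint not among vertices).
def Pre_edges_to_incidence_matrix (vertices : List Int) (edges : List (Int × Int)) (directed : Bool) : Prop :=
  ∀ e ∈ edges, e.1 ∈ vertices ∧ e.2 ∈ vertices
instance (vertices : List Int) (edges : List (Int × Int)) (directed : Bool) : Decidable (Pre_edges_to_incidence_matrix vertices edges directed) := by unfold Pre_edges_to_incidence_matrix; infer_instance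

def pvWitness_edges_to_incidence_matrix : List Int × (List (Int × Int)) × Bool :=
  ([1, 2, 3], [(1, 2), (2, 3), (3, 3)], true)

def Spec_edges_to_incidence_matrix (vertices : List Int) (edges : List (Int × Int)) (directed : Bool) (out : List (List Int)) : Prop := out = edges_to_incidence_matrix_alt vertices edges directed
instance (vertices : List Int) (edges : List (Int × Int)) (directed : Bool) (out : List (List Int)) : Decidable (Spec_edges_to_incidence_matrix vertices edges directed out) := by unfold Spec_edges_to_incidence_matrix; infer_instance

-- ===== CLAIM (what is proved, stated in full; the proofs are below) =====
def Claim_equal_edges_to_incidence_matrix : Prop := ∀ (vertices : List Int) (edges : List (Int × Int)) (directed : Bool), Dom_edges_to_incidence_matrix vertices edges directed → Pre_edges_to_incidence_matrix vertices edges directed → Spec_edges_to_incidence_matrix vertices edges directed (edges_to_incidence_matrix vertices edges directed)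

-- ===== LEMMAS AND PROOFS =====

theorem pvWitness_ok : Dom_edges_to_incidence_matrix pvWitness_edges_to_incidence_matrix.1 pvWitness_edges_to_incidence_matrix.2.1 pvWitness_edges_to_incidence_matrix.2.2 ∧ Pre_edges_to_incidence_matrix pvWitness_edges_to_incidence_matrix.1 pvWitness_edges_to_incidence_matrix.2.1 pvWitness_edges_to_incidence_matrix.2.2 := by
  constructor <;> decide

-- entry of row r contributed by edge e (the value both programs put at (r, col-of-e))
def pvEntry (idx : PySem.Dict Int Int) (directed : Bool) (r : Nat) (e : Int × Int) : Int :=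
  if r = pvLook idx e.2 then (if directed then -1 else 1)
  else if r = pvLook idx e.1 then 1 else 0

theorem pvStepA_eq (idx : PySem.Dict Int Int) (d : Bool) (M : List (List Int)) (p : Int × (Int × Int)) :
    pvStepA idx d M p =
      (M.set (pvLook idx p.2.1) ((M.getD (pvLook idx p.2.1) []).set p.1.toNat 1)).set (pvLook idx p.2.2)
        (((M.set (pvLook idx p.2.1) ((M.getD (pvLook idx p.2.1) []).set p.1.toNat 1)).getD (pvLook idx p.2.2) []).set
          p.1.toNat (if d then -1 else 1)) := by
  cases d <;> rfl

theorem idxAux_get_of_not_mem (vs : List Int) (u : Int) (h : u ∉ vs) :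
    ∀ (s : Int) (d : PySem.Dict Int Int),
      ((PySem.List.enumerate vs s).foldl (fun d p => d.insert p.2 p.1) d).get? u = d.get? u := by
  induction vs with
  | nil => intro s d; simp [PySem.List.enumerate_nil]
  | cons v tl ih =>
    intro s d
    simp only [PySem.List.enumerate_cons, List.foldl_cons]
    rw [ih (by simp_all) (s + 1)]
    rw [PySem.Dict.get?_insert]
    simp_all [eq_comm]

theorem idxAux_get_of_mem (vs : List Int) (u : Int) (h : u ∈ vs) :
    ∀ (s : Int) (d : PySem.Dict Int Int),
      ∃ i : Int, ((PySem.List.enumerate vs s).foldl (fun d p => d.insert p.2 p.1) d).get? u = some i ∧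
        s ≤ i ∧ i < s + vs.length := by
  induction vs with
  | nil => simp at h
  | cons v tl ih =>
    intro s d
    simp only [PySem.List.enumerate_cons, List.foldl_cons, List.length_cons]
    by_cases htl : u ∈ tl
    · obtain ⟨i, hi, h1, h2⟩ := ih htl (s + 1) (d.insert v s)
      refine ⟨i, hi, by omega, by push_cast; push_cast at h2; omega⟩
    · have hv : u = v := by simp_all
      refine ⟨s, ?_, le_refl s, by push_cast; omega⟩
      rw [idxAux_get_of_not_mem tl u htl]
      rw [PySem.Dict.get?_insert]
      simp [hv]

theorem pvLook_lt (vs : List Int) (u : Int) (h : u ∈ vs) : pvLook (pvIdx vs) u < vs.length := by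
  obtain ⟨i, hi, h1, h2⟩ := idxAux_get_of_mem vs u h 0 PySem.Dict.empty
  unfold pvLook pvIdx
  rw [hi]
  simp only [Option.getD_some]
  omega

theorem set_map_range {α : Type} (n : Nat) (f : Nat → α) (i : Nat) (x : α) (hi : i < n) :
    ((List.range n).map f).set i x = (List.range n).map (fun r => if r = i then x else f r) := by
  apply List.ext_getElem
  · simp
  · intro k h1 h2
    simp only [List.getElem_set, List.getElem_map, List.getElem_range]
    simp at h1
    split <;> simp_all [eq_comm]

theorem getD_map_range' {α : Type} (n : Nat) (f : Nat → α) (i : Nat) (d : α) (hi : i < n) :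
    ((List.range n).map f).getD i d = f i := by
  rw [List.getD_eq_getElem _ _ (by simp [hi])]
  simp

theorem set_append_left {α : Type} (l1 l2 : List α) (k : Nat) (x : α) :
    (l1 ++ l2).set (l1.length + k) x = l1 ++ l2.set k x := by
  induction l1 with
  | nil => simp
  | cons a tl ih => simp [List.length_cons, Nat.succ_add, ih]

theorem set_pref {s t : Nat} (pref : List Int) (hpl : pref.length = s) (w : Int) :
    (pref ++ List.replicate (t + 1) (0 : Int)).set s w = (pref ++ [w]) ++ List.replicate t (0 : Int) := by
  have h := set_append_left pref (List.replicate (t + 1) (0 : Int)) 0 w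
  simpa [hpl, List.replicate_succ, List.append_assoc] using h

theorem set_pref' {s t : Nat} (pref : List Int) (hpl : pref.length = s) (w w' : Int) :
    ((pref ++ [w]) ++ List.replicate t (0 : Int)).set s w' = (pref ++ [w']) ++ List.replicate t (0 : Int) := by
  have h := set_append_left pref ([w] ++ List.replicate t (0 : Int)) 0 w'
  simpa [hpl, List.append_assoc] using h

-- one step of A's fold, applied to a matrix in row-normal form
theorem step_eq (idx : PySem.Dict Int Int) (directed : Bool) (n t s : Nat) (pref : Nat → List Int)
    (hpl : ∀ r, (pref r).length = s) (e : Int × Int)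
    (hi : pvLook idx e.1 < n) (hj : pvLook idx e.2 < n) :
    pvStepA idx directed ((List.range n).map (fun r => pref r ++ List.replicate (t + 1) (0 : Int))) ((s : Int), e)
    = (List.range n).map (fun r => (pref r ++ [pvEntry idx directed r e]) ++ List.replicate t (0 : Int)) := by
  rw [pvStepA_eq]
  simp only [Int.toNat_natCast]
  set i := pvLook idx e.1 with hidef
  set j := pvLook idx e.2 with hjdef
  rw [getD_map_range' n _ i [] hi, set_pref (pref i) (hpl i) 1, set_map_range n _ i _ hi,
      getD_map_range' n _ j [] hj, set_map_range n _ j _ hj]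
  apply List.map_congr_left
  intro r _
  by_cases hrj : r = j <;> by_cases hri : r = i <;>
    simp [hrj, hri, pvEntry, ← hidef, ← hjdef, set_pref (pref j) (hpl j),
      set_pref' (pref j) (hpl j)] <;> simp_all [List.replicate_succ]

theorem A_inv (idx : PySem.Dict Int Int) (directed : Bool) (n : Nat) (es : List (Int × Int))
    (hes : ∀ e ∈ es, pvLook idx e.1 < n ∧ pvLook idx e.2 < n) :
    ∀ (s : Nat) (pref : Nat → List Int), (∀ r, (pref r).length = s) →
    (PySem.List.enumerate es (s : Int)).foldl (pvStepA idx directed)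
      ((List.range n).map (fun r => pref r ++ List.replicate es.length (0 : Int)))
    = (List.range n).map (fun r => pref r ++ es.map (pvEntry idx directed r)) := by
  induction es with
  | nil => intro s pref hpl; simp
  | cons e tl ih =>
    intro s pref hpl
    simp only [PySem.List.enumerate_cons, List.foldl_cons, List.length_cons]
    rw [step_eq idx directed n tl.length s pref hpl e (hes e (by simp)).1 (hes e (by simp)).2]
    have hcast : ((s : Int)) + 1 = ((s + 1 : Nat) : Int) := by push_cast; ring
    rw [hcast, ih (fun e he => hes e (by simp [he])) (s + 1)
        (fun r => (pref r ++ [pvEntry idx directed r e])) (by simp [hpl])]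
    apply List.map_congr_left
    intro r _
    simp

-- B's column entry at row r
theorem col_entry (i j : Nat) (n : Nat) (r : Nat) (hr : r < n) (v2 : Int) :
    (((List.replicate n (0 : Int)).set i 1).set j v2).getD r 0
    = (if r = j then v2 else if r = i then 1 else 0) := by
  rw [List.getD_eq_getElem _ _ (by simpa using hr)]
  simp only [List.getElem_set, List.getElem_replicate]
  by_cases h2 : r = j <;> by_cases h1 : r = i <;> simp_all [eq_comm]

-- ===== VERDICT (by name: the statement is the Claim_ definition above) =====
theorem edges_to_incidence_matrix_spec : Claim_equal_edges_to_incidence_matrix := by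
  intro vertices edges directed _ hpre
  unfold Spec_edges_to_incidence_matrix edges_to_incidence_matrix edges_to_incidence_matrix_alt
  have hes : ∀ e ∈ edges, pvLook (pvIdx vertices) e.1 < vertices.length ∧
      pvLook (pvIdx vertices) e.2 < vertices.length := by
    intro e he
    exact ⟨pvLook_lt _ _ (hpre e he).1, pvLook_lt _ _ (hpre e he).2⟩
  have hrepl : List.replicate vertices.length (List.replicate edges.length (0 : Int))
      = (List.range vertices.length).map (fun _ => ([] : List Int) ++ List.replicate edges.length (0 : Int)) := by
    simp [List.map_const']
  have hA := A_inv (pvIdx vertices) directed vertices.length edges hes 0 (fun _ => []) (fun _ => rfl)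
  push_cast at hA
  simp only [hrepl, hA]
  have hcolfun : (fun (e : Int × Int) =>
      if directed then
        ((List.replicate vertices.length (0 : Int)).set (pvLook (pvIdx vertices) e.1) 1).set (pvLook (pvIdx vertices) e.2) (-1)
      else
        ((List.replicate vertices.length (0 : Int)).set (pvLook (pvIdx vertices) e.1) 1).set (pvLook (pvIdx vertices) e.2) 1)
      = (fun (e : Int × Int) =>
        ((List.replicate vertices.length (0 : Int)).set (pvLook (pvIdx vertices) e.1) 1).set (pvLook (pvIdx vertices) e.2)
          (if directed then -1 else 1)) := by
    funext e; cases directed <;> rfl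
  rw [hcolfun]
  apply List.map_congr_left
  intro r hr
  simp only [List.mem_range] at hr
  simp only [List.nil_append]
  apply List.ext_getElem
  · simp
  · intro c h1 h2
    have hc : c < edges.length := by simpa using h1
    have hcols : ((edges.map (fun (e : Int × Int) =>
        ((List.replicate vertices.length (0 : Int)).set (pvLook (pvIdx vertices) e.1) 1).set (pvLook (pvIdx vertices) e.2)
          (if directed then -1 else 1))).getD c [])
        = ((List.replicate vertices.length (0 : Int)).set (pvLook (pvIdx vertices) edges[c].1) 1).set
            (pvLook (pvIdx vertices) edges[c].2) (if directed then -1 else 1) := by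
      rw [List.getD_eq_getElem _ _ (by simpa using hc)]
      simp
    simp only [List.getElem_map, List.getElem_range]
    rw [hcols, col_entry _ _ vertices.length r hr]
    simp [pvEntry]
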